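-- pv_equiv track=rewrite | github.com/transition-bibliographique/bibliostratus | noticesbib2arkBnF.py | nettoyage_lettresISBN
-- ===== SOURCE A (Python) =====
-- lettres = ["a","b","d","e","f","g","h","i","j","k","l","m","n","o","p","q","r","s","t","u","v","w","x","y","z"]
--
-- def nettoyage_lettresISBN(isbn):
--     isbn = isbn.lower()
--     prefix = isbn[0:-1]
--     cle = isbn[-1]
--     for lettre in lettres:
--         prefix = prefix.replace(lettre, "")
--     if (cle == "0"
--         or cle == "1"
--         or cle == "2"
--         or cle == "3"
--         or cle == "4"
--         or cle == "5"
--         or cle == "6"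
--         or cle == "7"
--         or cle == "8"
--         or cle == "9"):
--         cle = cle
--     elif (cle == "x"):
--         cle = "X"
--     else:
--         cle = ""
--     return prefix+cle
-- ===== SOURCE B (Python) =====
-- # B: single character-wise pass with a set instead of 25 sequential .replace scans;
-- # check digit collapsed to one conditional. Same IndexError on empty input.
-- _letters = frozenset("abdefghijklmnopqrstuvwxyz")
--
-- def nettoyage_lettresISBN(isbn):
--     isbn = isbn.lower()
--     cle = isbn[-1]
--     prefix = "".join(c for c in isbn[:-1] if c not in _letters)
--     if cle in "0123456789":
--         return prefix + cle
--     if cle == "x":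
--         return prefix + "X"
--     return prefix
-- ===== Notes on version B (the rewrite author's own statement) =====
-- stated objective: simpler
-- what changed: One character-wise filter pass over the prefix using a frozenset of the 25 letters instead of 25 sequential str.replace scans, and the 10-branch check-digit chain collapsed into one membership test.
import Mathlib
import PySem

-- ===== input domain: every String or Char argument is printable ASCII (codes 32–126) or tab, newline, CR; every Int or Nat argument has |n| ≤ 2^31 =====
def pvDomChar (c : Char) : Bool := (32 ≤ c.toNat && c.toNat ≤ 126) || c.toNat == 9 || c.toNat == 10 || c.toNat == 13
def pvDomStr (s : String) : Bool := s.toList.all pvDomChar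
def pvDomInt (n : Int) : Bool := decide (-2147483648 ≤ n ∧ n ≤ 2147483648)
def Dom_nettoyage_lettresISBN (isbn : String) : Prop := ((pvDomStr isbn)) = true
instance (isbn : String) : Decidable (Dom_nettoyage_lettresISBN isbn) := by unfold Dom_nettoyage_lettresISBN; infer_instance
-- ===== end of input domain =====

-- B replaces A's 25 sequential str.replace scans with one character-wise filter pass
-- and collapses the 10-way check-digit chain into one membership test (objective: simpler).

-- ===== PORT A =====
-- module-level constant `lettres` (each entry a 1-char string, i.e. a List Char)
def lettresA : List (List Char) :=
  [['a'],['b'],['d'],['e'],['f'],['g'],['h'],['i'],['j'],['k'],['l'],['m'],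
   ['n'],['o'],['p'],['q'],['r'],['s'],['t'],['u'],['v'],['w'],['x'],['y'],['z']]

def nettoyage_lettresISBN (isbn : String) : String :=
  let l := PySem.Chars.lower isbn.toList          -- isbn = isbn.lower()
  let prefix0 := PySem.List.slice l (some 0) (some (-1))   -- prefix = isbn[0:-1]
  let cle := PySem.List.pyGetD l (-1) ' '         -- cle = isbn[-1]  (IndexError on "" excluded by Pre_)
  let prefix1 := lettresA.foldl (fun p le => PySem.Chars.replace p le []) prefix0
  let cleOut : List Char :=
    if cle = '0' ∨ cle = '1' ∨ cle = '2' ∨ cle = '3' ∨ cle = '4' ∨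
       cle = '5' ∨ cle = '6' ∨ cle = '7' ∨ cle = '8' ∨ cle = '9' then [cle]
    else if cle = 'x' then ['X']
    else []
  String.ofList (prefix1 ++ cleOut)

-- ===== PORT B =====
-- the module-level frozenset of 25 letters
def lettersB : PySem.Set Char := PySem.Set.ofList "abdefghijklmnopqrstuvwxyz".toList

def nettoyage_lettresISBN_alt (isbn : String) : String :=
  let l := PySem.Chars.lower isbn.toList          -- isbn = isbn.lower()
  let cle := PySem.List.pyGetD l (-1) ' '         -- cle = isbn[-1]
  let pfx := l.dropLast.filter (fun c => !(PySem.Set.contains lettersB c))  -- one pass over isbn[:-1]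
  if PySem.Chars.isIn [cle] "0123456789".toList then String.ofList (pfx ++ [cle])
  else if cle = 'x' then String.ofList (pfx ++ ['X'])
  else String.ofList pfx

-- ===== PRECONDITION & SPEC =====
-- A raises IndexError on the empty string (isbn[-1]); exactly that input is excluded.
def Pre_nettoyage_lettresISBN (isbn : String) : Prop := isbn ≠ ""
instance (isbn : String) : Decidable (Pre_nettoyage_lettresISBN isbn) := by unfold Pre_nettoyage_lettresISBN; infer_instance
def pvWitness_nettoyage_lettresISBN : String := "207036822x"

def Spec_nettoyage_lettresISBN (isbn : String) (out : String) : Prop := out = nettoyage_lettresISBN_alt isbn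
instance (isbn : String) (out : String) : Decidable (Spec_nettoyage_lettresISBN isbn out) := by unfold Spec_nettoyage_lettresISBN; infer_instance

-- ===== CLAIM (what is proved, stated in full; the proofs are below) =====
def Claim_equal_nettoyage_lettresISBN : Prop := ∀ (isbn : String), Dom_nettoyage_lettresISBN isbn → Pre_nettoyage_lettresISBN isbn → Spec_nettoyage_lettresISBN isbn (nettoyage_lettresISBN isbn)

-- ===== LEMMAS AND PROOFS =====

-- str.replace by a single character with "" is a filter (specific to this file's use of replace)
theorem replace_go_single (c : Char) (l : List Char) : ∀ (fuel : Nat) (acc : List Char),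
    l.length ≤ fuel →
    PySem.Chars.replace.go [c] [] fuel l acc = acc.reverse ++ l.filter (fun x => !(x == c)) := by
  induction l with
  | nil =>
      intro fuel acc _
      cases fuel <;> simp [PySem.Chars.replace.go]
  | cons c' t ih =>
      intro fuel acc h
      cases fuel with
      | zero => simp at h
      | succ f =>
        by_cases hc : c = c'
        · subst hc
          simp only [PySem.Chars.replace.go, List.isPrefixOf, beq_self_eq_true, Bool.true_and,
            List.drop_succ_cons, List.drop_zero, List.length_singleton,
            List.reverse_nil, List.nil_append, if_true]
          rw [ih f acc (by simpa using h)]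
          simp
        · have hb : ([c].isPrefixOf (c' :: t)) = false := by
            simpa [List.isPrefixOf, beq_eq_false_iff_ne] using hc
          simp only [PySem.Chars.replace.go, hb]
          rw [ih f (c' :: acc) (by simpa using Nat.le_of_succ_le_succ h)]
          have hcc : (c' == c) = false := by
            simp [beq_eq_false_iff_ne]; exact fun h' => hc h'.symm
          simp [hcc]

theorem replace_single_nil (c : Char) (s : List Char) :
    PySem.Chars.replace s [c] [] = s.filter (fun x => !(x == c)) := by
  rw [PySem.Chars.replace]
  simp only [List.isEmpty_cons, if_false, Bool.false_eq_true]
  exact replace_go_single c s s.length [] le_rfl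

-- a fold of single-character replaces is one filter by list membership
theorem fold_replace_eq_filter (cs : List Char) (p : List Char) :
    (cs.map (fun c => [c])).foldl (fun q le => PySem.Chars.replace q le []) p
      = p.filter (fun x => !(cs.contains x)) := by
  induction cs generalizing p with
  | nil => simp
  | cons c cs ih =>
      simp only [List.map_cons, List.foldl_cons, replace_single_nil, ih, List.filter_filter]
      apply List.filter_congr
      intro x _
      by_cases hxc : x = c <;> simp [hxc, Bool.and_comm]

-- the 25-step replace fold is one filter by the letter set
theorem foldA_eq_filter (p : List Char) :
    lettresA.foldl (fun q le => PySem.Chars.replace q le []) p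
      = p.filter (fun c => !(PySem.Set.contains lettersB c)) := by
  have h : lettresA = ("abdefghijklmnopqrstuvwxyz".toList).map (fun c => [c]) := by decide
  rw [h, fold_replace_eq_filter]
  apply List.filter_congr
  intro x _
  simp [lettersB, PySem.Set.contains, List.contains_eq_mem, PySem.Set.mem_ofList]

-- single-char `in` on a string is list membership
theorem isIn_single_digits (c : Char) :
    PySem.Chars.isIn [c] "0123456789".toList = true ↔
      (c = '0' ∨ c = '1' ∨ c = '2' ∨ c = '3' ∨ c = '4' ∨
       c = '5' ∨ c = '6' ∨ c = '7' ∨ c = '8' ∨ c = '9') := by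
  rw [PySem.Chars.isIn_iff_infix]
  constructor
  · intro h
    have hm : c ∈ "0123456789".toList := by
      rcases h with ⟨u, v, huv⟩
      have hx : c ∈ u ++ [c] ++ v := by simp
      rw [huv] at hx
      simpa using hx
    simpa using hm
  · intro h
    have hm : c ∈ "0123456789".toList := by simpa using h
    rcases List.mem_iff_append.mp hm with ⟨u, v, huv⟩
    exact ⟨u, v, by simp [huv]⟩

-- ===== VERDICT (by name: the statement is the Claim_ definition above) =====
theorem nettoyage_lettresISBN_spec : Claim_equal_nettoyage_lettresISBN := by
  intro isbn _ hpre
  unfold Spec_nettoyage_lettresISBN nettoyage_lettresISBN nettoyage_lettresISBN_alt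
  simp only []
  rw [PySem.List.slice_zero_start, PySem.List.slice_to_neg_one, foldA_eq_filter]
  set cle := PySem.List.pyGetD (PySem.Chars.lower isbn.toList) (-1) ' ' with hcle
  by_cases hd : PySem.Chars.isIn [cle] "0123456789".toList = true
  · rw [if_pos ((isIn_single_digits cle).mp hd), if_pos hd]
  · rw [if_neg (fun h => hd ((isIn_single_digits cle).mpr h)), if_neg hd]
    by_cases hx : cle = 'x' <;> simp [hx]
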